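-- pv_equiv track=rewrite | github.com/olsen413/test-repo | note_cleaner_after_first_batch_errors.py | get_dangling_first
-- ===== SOURCE A (Python) =====
-- def get_dangling_first(str_in):
--     '''
--     The first line of the note will be at the end of the first line of input.
--     This function moves from the end of that line until it encounters a junk
--     character.
--     Outputs the first line of the note as a string
--     '''
--     str_out = ''
--     for char in reversed(str_in):
--         if (char.isalpha() or char in ' ",.\n\'()'):
--             str_out = char + str_out
--         else:
--             return str_out.strip()
--     return str_out.strip()
-- ===== SOURCE B (Python) =====
-- def get_dangling_first(str_in):
--     cut = 0
--     for i, char in enumerate(str_in):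
--         if not (char.isalpha() or char in ' ",.\n\'()'):
--             cut = i + 1
--     return str_in[cut:].strip()
-- ===== Notes on version B (the rewrite author's own statement) =====
-- stated objective: faster
-- what changed: Replaced A's backward scan that accumulates the suffix string by per-character prepending (quadratic string building) with a single forward pass that only tracks the cut index after the last junk character, followed by one slice of the original string and a strip.
import Mathlib
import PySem

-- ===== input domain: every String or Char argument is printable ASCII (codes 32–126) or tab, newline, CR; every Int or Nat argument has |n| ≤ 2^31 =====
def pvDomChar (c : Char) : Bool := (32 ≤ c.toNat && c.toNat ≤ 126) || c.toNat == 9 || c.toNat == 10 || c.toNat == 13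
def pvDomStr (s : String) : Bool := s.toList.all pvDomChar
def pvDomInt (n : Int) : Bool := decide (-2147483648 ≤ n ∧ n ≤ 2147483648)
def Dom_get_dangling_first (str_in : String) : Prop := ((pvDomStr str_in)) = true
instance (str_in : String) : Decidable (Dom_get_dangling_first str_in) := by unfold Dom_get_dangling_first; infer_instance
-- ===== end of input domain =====

-- B replaces A's backward scan, which builds the suffix by per-character string
-- prepending, with a single forward pass tracking only the cut index after the last
-- junk character, then one slice + strip (objective: faster; measured).

-- shared predicate: `char.isalpha() or char in ' ",.\n'()'` (verbatim in both Pythons)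
def pvAllowed (c : Char) : Bool :=
  PySem.Chars.isalpha c || [' ', '"', ',', '.', '\n', '\'', '(', ')'].contains c

-- ===== PORT A =====
-- loop over reversed(str_in); str_out accumulated by prepending; early return strips
def pvALoop : List Char → List Char → List Char
  | [], acc => PySem.Chars.strip acc
  | c :: rest, acc =>
      if pvAllowed c then pvALoop rest (c :: acc) else PySem.Chars.strip acc

def get_dangling_first (str_in : String) : String :=
  String.ofList (pvALoop str_in.toList.reverse [])

-- ===== PORT B =====
-- forward pass over enumerate(str_in): cut = i+1 whenever the char is not allowed;
-- then str_in[cut:].strip()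
def get_dangling_first_alt (str_in : String) : String :=
  let cut : Int :=
    (PySem.List.enumerate str_in.toList 0).foldl
      (fun cut p => if pvAllowed p.2 then cut else p.1 + 1) 0
  String.ofList (PySem.Chars.strip (PySem.List.slice str_in.toList (some cut) none))

-- ===== PRECONDITION & SPEC =====
def Spec_get_dangling_first (str_in : String) (out : String) : Prop := out = get_dangling_first_alt str_in
instance (str_in : String) (out : String) : Decidable (Spec_get_dangling_first str_in out) := by unfold Spec_get_dangling_first; infer_instance

-- ===== CLAIM (what is proved, stated in full; the proofs are below) =====
def Claim_equal_get_dangling_first : Prop := ∀ (str_in : String), Dom_get_dangling_first str_in → Spec_get_dangling_first str_in (get_dangling_first str_in)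

-- ===== LEMMAS AND PROOFS =====

-- A's loop collects the allowed prefix of its (reversed) argument in front of acc
theorem pvALoop_eq (r acc : List Char) :
    pvALoop r acc = PySem.Chars.strip ((r.takeWhile pvAllowed).reverse ++ acc) := by
  induction r generalizing acc with
  | nil => simp [pvALoop]
  | cons c rest ih =>
      by_cases h : pvAllowed c
      · simp [pvALoop, h, ih]
      · simp [pvALoop, h]

-- B's fold computes length − (length of the allowed suffix)
theorem pvCut_eq (l : List Char) (c0 s : Int) :
    (PySem.List.enumerate l s).foldl
        (fun cut p => if pvAllowed p.2 then cut else p.1 + 1) c0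
      = if (l.reverse.takeWhile pvAllowed).length = l.length then c0
        else s + (l.length - (l.reverse.takeWhile pvAllowed).length : Int) := by
  induction l using List.reverseRecOn generalizing c0 s with
  | nil => simp
  | append_singleton xs x ih =>
      rw [PySem.List.enumerate_append, List.foldl_append]
      by_cases h : pvAllowed x
      · have hk : ((xs ++ [x]).reverse.takeWhile pvAllowed)
            = x :: xs.reverse.takeWhile pvAllowed := by
          simp [h]
        simp only [PySem.List.enumerate, List.foldl_cons, List.foldl_nil, h, if_pos, ih, hk]
        have hle : (xs.reverse.takeWhile pvAllowed).length ≤ xs.length := by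
          simpa using (List.takeWhile_sublist (l := xs.reverse) pvAllowed).length_le
        by_cases hfull : (xs.reverse.takeWhile pvAllowed).length = xs.length
        · simp [hfull, List.length_append]
        · simp [hfull, List.length_append]
      · have hk : ((xs ++ [x]).reverse.takeWhile pvAllowed) = [] := by
          simp [h]
        simp only [PySem.List.enumerate, List.foldl_cons, List.foldl_nil, h, hk]
        simp [List.length_append]
        omega

-- ===== VERDICT (by name: the statement is the Claim_ definition above) =====
theorem get_dangling_first_spec : Claim_equal_get_dangling_first := by
  intro s _
  unfold Spec_get_dangling_first get_dangling_first get_dangling_first_alt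
  set l := s.toList with hl
  have hle : (l.reverse.takeWhile pvAllowed).length ≤ l.length := by
    simpa using (List.takeWhile_sublist (l := l.reverse) pvAllowed).length_le
  have hcut :
      (PySem.List.enumerate l 0).foldl
        (fun cut p => if pvAllowed p.2 then cut else p.1 + 1) 0
      = ((l.length - (l.reverse.takeWhile pvAllowed).length : Nat) : Int) := by
    rw [pvCut_eq]
    by_cases hfull : (l.reverse.takeWhile pvAllowed).length = l.length <;>
      simp [hfull] <;> omega
  simp only [hcut]
  rw [PySem.List.slice_from_natCast]
  rw [pvALoop_eq]
  simp only [List.append_nil]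
  congr 2
  have : l.reverse.takeWhile pvAllowed
      = l.reverse.take (l.reverse.takeWhile pvAllowed).length := by
    exact List.prefix_iff_eq_take.mp (List.takeWhile_prefix pvAllowed)
  calc (l.reverse.takeWhile pvAllowed).reverse
      = (l.reverse.take (l.reverse.takeWhile pvAllowed).length).reverse := congrArg List.reverse this
    _ = l.drop (l.length - (l.reverse.takeWhile pvAllowed).length) := by
        rw [List.take_reverse, List.reverse_reverse]
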